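-- pv_equiv track=rewrite | github.com/Gabriel-lin/Mozi | server/services/agent/skills_fs.py | _loose_path_skill_id
-- ===== SOURCE A (Python) =====
-- def _loose_path_skill_id(s: str) -> bool:
--     """Skill id: optional nested path, no .., no empty segment, no hidden path components."""
--     t = s.strip().replace("\\", "/").strip("/")
--     if not t or ".." in t.split("/"):
--         return False
--     for part in t.split("/"):
--         if not part or part in (".", ".."):
--             return False
--         if part.startswith("."):
--             return False
--     return True
-- ===== SOURCE B (Python) =====
-- def _loose_path_skill_id(s: str) -> bool:
--     """Skill id: optional nested path, no .., no empty segment, no hidden path components."""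
--     t = s.strip().replace("\\", "/").strip("/")
--     if not t:
--         return False
--     prev = "/"
--     for ch in t:
--         if prev == "/" and ch in "/.":
--             return False
--         prev = ch
--     return True
-- ===== Notes on version B (the rewrite author's own statement) =====
-- stated objective: alternative
-- what changed: Replaces A's split-into-segments pass plus per-segment loop (with a redundant parent-reference membership pre-check) by a single left-to-right character scan that tracks the previous character and rejects exactly when a separator or a dot immediately follows a segment boundary.
import Mathlib
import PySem

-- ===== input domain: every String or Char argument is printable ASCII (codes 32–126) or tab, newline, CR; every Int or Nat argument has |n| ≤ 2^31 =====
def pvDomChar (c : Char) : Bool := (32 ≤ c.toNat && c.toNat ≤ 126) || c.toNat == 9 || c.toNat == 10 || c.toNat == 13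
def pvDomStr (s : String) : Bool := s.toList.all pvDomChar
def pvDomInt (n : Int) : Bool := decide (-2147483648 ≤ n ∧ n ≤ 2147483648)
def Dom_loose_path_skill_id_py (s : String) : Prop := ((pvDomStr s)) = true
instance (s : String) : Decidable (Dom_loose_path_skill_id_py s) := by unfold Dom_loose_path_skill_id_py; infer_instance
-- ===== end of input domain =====

-- B replaces A's split('/')-and-loop over segments (plus its redundant '..' membership
-- pre-check) by a single character scan tracking the previous character; same results, same cost.

-- ===== PORT A =====
-- the 'for part in t.split("/")' loop with its early returns
def loosePartsLoop : List String → Bool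
  | [] => true
  | p :: rest =>
    if p == "" || p == "." || p == ".." then false
    else if PySem.Str.startswith p "." then false
    else loosePartsLoop rest

def loose_path_skill_id_py (s : String) : Bool :=
  let t := PySem.Str.stripChars (PySem.Str.replace (PySem.Str.strip s) "\\" "/") "/"
  -- t.split("/"): the separator "/" is non-empty, so Str.split? is always `some`; `.getD []` only unwraps it
  if t == "" || ((PySem.Str.split? t "/").getD []).contains ".." then false
  else loosePartsLoop ((PySem.Str.split? t "/").getD [])

-- ===== PORT B =====
-- the 'for ch in t' loop carrying prev; 'ch in "/."' is the two-character membership test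
def pvScan : Char → List Char → Bool
  | _, [] => true
  | prev, c :: rest =>
    if prev == '/' && (c == '/' || c == '.') then false
    else pvScan c rest

def loose_path_skill_id_py_alt (s : String) : Bool :=
  let t := PySem.Str.stripChars (PySem.Str.replace (PySem.Str.strip s) "\\" "/") "/"
  if t == "" then false
  else pvScan '/' t.toList

-- ===== PRECONDITION & SPEC =====
def Spec_loose_path_skill_id_py (s : String) (out : Bool) : Prop := out = loose_path_skill_id_py_alt s
instance (s : String) (out : Bool) : Decidable (Spec_loose_path_skill_id_py s out) := by unfold Spec_loose_path_skill_id_py; infer_instance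

-- ===== CLAIM (what is proved, stated in full; the proofs are below) =====
def Claim_equal_loose_path_skill_id_py : Prop := ∀ (s : String), Dom_loose_path_skill_id_py s → Spec_loose_path_skill_id_py s (loose_path_skill_id_py s)

-- ===== LEMMAS AND PROOFS =====

-- reference splitter: t.split('/') written as plain structural recursion (cur = reversed current segment)
def pvSplit : List Char → List Char → List (List Char)
  | [], cur => [cur.reverse]
  | c :: r, cur => if c = '/' then cur.reverse :: pvSplit r [] else pvSplit r (c :: cur)

-- a segment is acceptable iff non-empty and not starting with '.'
def pvOk : List Char → Bool
  | [] => false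
  | c :: _ => !(c == '.')

theorem pvGo_cons (f : Nat) (c : Char) (r cur : List Char) (acc : List (List Char)) :
    PySem.Chars.splitOn.go ['/'] (f+1) (c :: r) cur acc =
      if c = '/' then PySem.Chars.splitOn.go ['/'] f r [] (cur.reverse :: acc)
      else PySem.Chars.splitOn.go ['/'] f r (c :: cur) acc := by
  rw [PySem.Chars.splitOn.go.eq_def]
  by_cases h : c = '/'
  · simp [List.isPrefixOf, h]
  · simp [List.isPrefixOf, h]
    intro hh; exact (h hh.symm).elim

theorem pvGo_nil (f : Nat) (cur : List Char) (acc : List (List Char)) :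
    PySem.Chars.splitOn.go ['/'] (f+1) [] cur acc = (cur.reverse :: acc).reverse := by
  rw [PySem.Chars.splitOn.go.eq_def]

theorem pvGo_eq_pvSplit (l : List Char) : ∀ (f : Nat) (cur : List Char) (acc : List (List Char)),
    l.length < f →
    PySem.Chars.splitOn.go ['/'] f l cur acc = acc.reverse ++ pvSplit l cur := by
  induction l with
  | nil =>
    intro f cur acc hf
    obtain ⟨f', rfl⟩ : ∃ f', f = f' + 1 := ⟨f - 1, by omega⟩
    rw [pvGo_nil]; simp [pvSplit]
  | cons c r ih =>
    intro f cur acc hf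
    obtain ⟨f', rfl⟩ : ∃ f', f = f' + 1 := ⟨f - 1, by omega⟩
    rw [pvGo_cons]
    by_cases h : c = '/'
    · simp only [h, pvSplit]
      rw [ih f' [] (cur.reverse :: acc) (by simpa using Nat.lt_of_succ_lt_succ hf)]
      simp
    · simp only [if_neg h, pvSplit]
      rw [ih f' (c :: cur) acc (by simpa using Nat.lt_of_succ_lt_succ hf)]

theorem pvSplitOn_eq (cs : List Char) : PySem.Chars.splitOn cs ['/'] = pvSplit cs [] := by
  show PySem.Chars.splitOn.go ['/'] (cs.length + 1) cs [] [] = pvSplit cs []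
  rw [pvGo_eq_pvSplit cs (cs.length + 1) [] [] (by omega)]
  simp

theorem pvOk_append_singleton (p : List Char) (c : Char) (h : p ≠ []) :
    pvOk (p ++ [c]) = pvOk p := by
  cases p with
  | nil => exact absurd rfl h
  | cons a q => simp [pvOk]

-- once the current segment is already bad, the whole split is bad
theorem pvSplit_bad (l : List Char) : ∀ cur, cur ≠ [] → pvOk cur.reverse = false →
    (pvSplit l cur).all pvOk = false := by
  induction l with
  | nil => intro cur _ hbad; simp [pvSplit, hbad]
  | cons c r ih =>
    intro cur hne hbad
    by_cases h : c = '/'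
    · simp [pvSplit, h, hbad]
    · simp only [pvSplit, if_neg h]
      refine ih (c :: cur) (by simp) ?_
      rw [List.reverse_cons, pvOk_append_singleton _ _ (by simpa using hne)]
      exact hbad

theorem pvLast_tail {c : Char} {r : List Char} (h : (c :: r).getLast? ≠ some '/') :
    r.getLast? ≠ some '/' := by
  cases r with
  | nil => simp
  | cons b q => rwa [List.getLast?_cons_cons] at h

-- the main invariant: the scan with previous character `prev` agrees with checking all
-- remaining segments, as long as the remaining text does not end in '/'
theorem pvScan_eq_all (l : List Char) : ∀ (prev : Char) (cur : List Char),
    ((cur = [] ∧ prev = '/') ∨ (prev ≠ '/' ∧ pvOk cur.reverse = true)) →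
    (l = [] → cur ≠ []) → l.getLast? ≠ some '/' →
    (pvSplit l cur).all pvOk = pvScan prev l := by
  induction l with
  | nil =>
    intro prev cur hst hne _
    rcases hst with ⟨hc, _⟩ | ⟨_, hok⟩
    · exact absurd hc (hne rfl)
    · simp [pvSplit, pvScan, hok]
  | cons c r ih =>
    intro prev cur hst hne hlast
    by_cases h : c = '/'
    · subst h
      rcases hst with ⟨hc, hp⟩ | ⟨hp, hok⟩
      · subst hc; subst hp
        simp [pvSplit, pvScan, pvOk]
      · have hr : r ≠ [] := by
          intro hr; rw [hr] at hlast; simp at hlast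
        rw [show pvSplit ('/' :: r) cur = cur.reverse :: pvSplit r [] from by simp [pvSplit]]
        rw [List.all_cons, hok, Bool.true_and]
        rw [ih '/' [] (Or.inl ⟨rfl, rfl⟩) (fun hh => absurd hh hr) (pvLast_tail hlast)]
        simp [pvScan, hp]
    · rcases hst with ⟨hc, hp⟩ | ⟨hp, hok⟩
      · subst hc; subst hp
        simp only [pvSplit, if_neg h]
        by_cases hd : c = '.'
        · subst hd
          rw [pvSplit_bad r ['.'] (by simp) (by simp [pvOk])]
          simp [pvScan]
        · rw [ih c [c] (Or.inr ⟨h, by simp [pvOk, hd]⟩) (fun _ => by simp)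
              (pvLast_tail hlast)]
          simp [pvScan, h, hd]
      · have hcur : cur ≠ [] := by
          intro e; rw [e] at hok; simp [pvOk] at hok
        simp only [pvSplit, if_neg h]
        rw [ih c (c :: cur)
              (Or.inr ⟨h, by
                rw [List.reverse_cons, pvOk_append_singleton _ _ (by simpa using hcur)]
                exact hok⟩)
              (fun _ => by simp) (pvLast_tail hlast)]
        simp [pvScan, hp]

-- String.ofList translated back to list equality
theorem pvBeq_ofList (p : List Char) (t : String) : (String.ofList p == t) = decide (p = t.toList) := by
  by_cases hp : p = t.toList
  · subst hp
    simp [String.ofList_toList]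
  · simp only [hp, decide_false]
    rw [beq_eq_false_iff_ne]
    intro e
    exact hp (by rw [← e]; simp)

-- A's inner loop is `all`, after mapping the char segments to Strings
theorem pvLoop_map (segs : List (List Char)) :
    loosePartsLoop (segs.map String.ofList) = segs.all pvOk := by
  induction segs with
  | nil => rfl
  | cons p rest ih =>
    simp only [List.map_cons, List.all_cons, loosePartsLoop, ← ih]
    cases p with
    | nil => simp [pvOk]
    | cons c cs =>
      have hsw : PySem.Chars.startswith (c :: cs) ['.'] = (c == '.') := by
        simp only [PySem.Chars.startswith, List.isPrefixOf, Bool.and_true]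
        cases hb : c == '.'
        · simp [ne_comm.mp (beq_eq_false_iff_ne.mp hb)]
        · simp [beq_iff_eq.mp hb]
      by_cases hd : c = '.'
      · subst hd
        simp only [pvOk, beq_self_eq_true, Bool.not_true, Bool.false_and]
        by_cases h1 : ('.' :: cs : List Char) = [] ∨ ('.' :: cs : List Char) = ['.'] ∨ ('.' :: cs : List Char) = ['.','.']
        · rcases h1 with h1 | h1 | h1 <;> simp_all
        · have h1a : ('.' :: cs : List Char) ≠ [] := fun h => h1 (Or.inl h)
          have h1b : ('.' :: cs : List Char) ≠ ['.'] := fun h => h1 (Or.inr (Or.inl h))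
          have h1c : ('.' :: cs : List Char) ≠ ['.', '.'] := fun h => h1 (Or.inr (Or.inr h))
          simp [pvBeq_ofList, h1a, h1b, h1c, PySem.Str.startswith, hsw]
      · have h1 : (c :: cs : List Char) ≠ ['.'] := by simp [hd]
        have h2 : (c :: cs : List Char) ≠ ['.','.'] := by simp [hd]
        simp [pvBeq_ofList, h1, h2, PySem.Str.startswith, hsw, hd, pvOk]

-- the '..' membership pre-check never changes the answer: a '..' segment already fails `all pvOk`
theorem pvContains_bad (segs : List (List Char))
    (h : (segs.map String.ofList).contains ".." = true) : segs.all pvOk = false := by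
  rw [List.contains_eq_mem, decide_eq_true_iff] at h
  obtain ⟨p, hp, he⟩ := List.mem_map.mp h
  have hpl : p = ['.', '.'] := by
    have := congrArg String.toList he
    simpa using this
  rw [List.all_eq_false]
  exact ⟨p, hp, by simp [hpl, pvOk]⟩

-- the normalized string never ends in '/'
theorem pvStripLast (l : List Char) :
    (PySem.Chars.stripChars l ['/']).getLast? ≠ some '/' := by
  unfold PySem.Chars.stripChars
  intro h
  rw [List.getLast?_reverse] at h
  have hne : List.dropWhile (fun c => (['/'] : List Char).contains c)
      (List.dropWhile (fun c => (['/'] : List Char).contains c) l).reverse ≠ [] := by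
    intro hh; rw [hh] at h; simp at h
  have hh := List.head_dropWhile_not (fun c => (['/'] : List Char).contains c)
      (l := (List.dropWhile (fun c => (['/'] : List Char).contains c) l).reverse) hne
  rw [List.head?_eq_some_head hne] at h
  rw [Option.some_inj.mp h] at hh
  simp at hh

theorem pvSplit?_getD (t : String) :
    (PySem.Str.split? t "/").getD [] = (pvSplit t.toList []).map String.ofList := by
  have hsep : ("/" : String).toList = ['/'] := rfl
  simp [PySem.Str.split?, PySem.Chars.split?, hsep, pvSplitOn_eq]

-- ===== VERDICT (by name: the statement is the Claim_ definition above) =====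
theorem loose_path_skill_id_py_spec : Claim_equal_loose_path_skill_id_py := by
  intro s _
  show loose_path_skill_id_py s = loose_path_skill_id_py_alt s
  unfold loose_path_skill_id_py loose_path_skill_id_py_alt
  set t := PySem.Str.stripChars (PySem.Str.replace (PySem.Str.strip s) "\\" "/") "/" with ht
  show (if (t == "" || ((PySem.Str.split? t "/").getD []).contains "..") = true then false
        else loosePartsLoop ((PySem.Str.split? t "/").getD [])) =
       (if (t == "") = true then false else pvScan '/' t.toList)
  by_cases h0 : t = ""
  · simp [h0]
  · have h0' : (t == "") = false := by simp [h0]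
    have hcs : t.toList ≠ [] := by
      intro e
      exact h0 (by rw [← @String.ofList_toList t, e])
    have hlast : t.toList.getLast? ≠ some '/' := by
      rw [ht]
      rw [PySem.Str.toList_stripChars]
      exact pvStripLast _
    have hall := pvScan_eq_all t.toList '/' [] (Or.inl ⟨rfl, rfl⟩)
      (fun hh => absurd hh hcs) hlast
    rw [pvSplit?_getD]
    by_cases hc : ((pvSplit t.toList []).map String.ofList).contains ".." = true
    · rw [if_pos (by rw [h0', Bool.false_or]; exact hc), if_neg (by simp [h0'])]
      rw [← hall, pvContains_bad _ hc]
    · have hcf : (List.map String.ofList (pvSplit t.toList [])).contains ".." = false :=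
        Bool.eq_false_iff.mpr hc
      rw [if_neg (by rw [h0', Bool.false_or, hcf]; exact Bool.false_ne_true), if_neg (by simp [h0'])]
      rw [pvLoop_map, hall]
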